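-- pv_equiv track=rewrite | github.com/AdamZhouSE/pythonHomework | Code/CodeRecords/2741/60727/249437.py | solution
-- ===== SOURCE A (Python) =====
-- def solution(li):
--     leng = len(li)
--     maxLen = 0
--     for i in range(0,leng-1):
--         count=0
--         temp=i
--         if leng-1-i<maxLen or leng-1-i==maxLen:
--             return maxLen
--         for j in range(i+1,leng):
--             if li[j]>li[i]:
--                 count+=1
--                 temp+=1
--             else:
--                 i=temp+1
--                 if maxLen<count:
--                     maxLen = count
--                 break
--     return maxLen
-- ===== SOURCE B (Python) =====
-- def solution(li):
--     # Monotonic stack: for each i, the nearest index j > i with li[j] <= li[i],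
--     # found in one right-to-left pass; answer is the max of j - i - 1.
--     n = len(li)
--     best = 0
--     stack = []
--     for i in range(n - 1, -1, -1):
--         while stack and li[stack[-1]] > li[i]:
--             stack.pop()
--         if stack:
--             cand = stack[-1] - i - 1
--             if cand > best:
--                 best = cand
--         stack.append(i)
--     return best
-- ===== Notes on version B (the rewrite author's own statement) =====
-- stated objective: faster
-- what changed: Replaced the nested rescan (for each i, scan forward to the first element <= li[i]) by a single right-to-left pass with a monotonic stack of indices that yields each index's nearest non-greater successor directly.
import Mathlib
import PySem

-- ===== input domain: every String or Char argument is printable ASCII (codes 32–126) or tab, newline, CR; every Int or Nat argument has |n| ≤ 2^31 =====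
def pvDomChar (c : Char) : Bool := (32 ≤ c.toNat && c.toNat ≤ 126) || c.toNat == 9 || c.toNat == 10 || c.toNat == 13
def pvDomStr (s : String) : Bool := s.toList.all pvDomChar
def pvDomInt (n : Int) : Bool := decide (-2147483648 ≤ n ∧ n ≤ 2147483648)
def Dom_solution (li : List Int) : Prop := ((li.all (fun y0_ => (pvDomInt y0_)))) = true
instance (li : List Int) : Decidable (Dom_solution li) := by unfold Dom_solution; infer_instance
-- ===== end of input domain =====

-- B replaces A's nested forward rescans by one right-to-left monotonic-stack pass (objective: faster).

-- ===== PORT A =====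
-- inner loop: `for j in range(i+1, leng)`; Python's `i = temp + 1` inside the loop body
-- cannot affect the `for i in range(...)` iteration, so it is a no-op (temp itself is kept).
def pvInner (li : List Int) (iv c temp maxLen : Int) (js : List Int) : Int :=
  match js with
  | [] => maxLen
  | j :: rest =>
    if PySem.List.pyGetD li j 0 > PySem.List.pyGetD li iv 0 then
      pvInner li iv (c + 1) (temp + 1) maxLen rest
    else if maxLen < c then c else maxLen

def pvOuter (li : List Int) (leng : Int) (is : List Int) (maxLen : Int) : Int :=
  match is with
  | [] => maxLen
  | i :: rest =>
    if leng - 1 - i < maxLen ∨ leng - 1 - i = maxLen then maxLen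
    else pvOuter li leng rest (pvInner li i 0 i maxLen (PySem.List.pyRange (i + 1) leng 1))

def solution (li : List Int) : Int :=
  pvOuter li (li.length : Int) (PySem.List.pyRange 0 ((li.length : Int) - 1) 1) 0

-- ===== PORT B =====
-- `while stack and li[stack[-1]] > li[i]: stack.pop()` (stack head = Python stack[-1])
def pvPop (li : List Int) (x : Int) (stack : List Int) : List Int :=
  match stack with
  | [] => []
  | t :: s => if PySem.List.pyGetD li t 0 > x then pvPop li x s else t :: s

def pvAlt (li : List Int) (is stack : List Int) (best : Int) : Int :=
  match is with
  | [] => best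
  | i :: rest =>
    let st := pvPop li (PySem.List.pyGetD li i 0) stack
    let best' :=
      match st with
      | [] => best
      | t :: _ => if t - i - 1 > best then t - i - 1 else best
    pvAlt li rest (i :: st) best'

def solution_alt (li : List Int) : Int :=
  pvAlt li (PySem.List.pyRange ((li.length : Int) - 1) (-1) (-1)) [] 0

-- ===== PRECONDITION & SPEC =====
def Spec_solution (li : List Int) (out : Int) : Prop := out = solution_alt li
instance (li : List Int) (out : Int) : Decidable (Spec_solution li out) := by unfold Spec_solution; infer_instance

-- ===== CLAIM (what is proved, stated in full; the proofs are below) =====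
def Claim_equal_solution : Prop := ∀ (li : List Int), Dom_solution li → Spec_solution li (solution li)

-- ===== LEMMAS AND PROOFS =====

-- first index t' ≥ t with li[t'] ≤ x (the "breaker" A's inner loop stops at)
def findLE (li : List Int) (x t : Int) : Option Int :=
  if h : t < (li.length : Int) then
    if PySem.List.pyGetD li t 0 ≤ x then some t else findLE li x (t + 1)
  else none
termination_by ((li.length : Int) - t).toNat
decreasing_by omega

-- candidate value contributed by pivot index i (0 when no breaker exists)
def candD (li : List Int) (i : Int) : Int :=
  (findLE li (PySem.List.pyGetD li i 0) (i + 1)).elim 0 (fun j => j - i - 1)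

-- the stack after B has processed indices i..len-1 (right to left)
def stSpec (li : List Int) (i : Int) : List Int :=
  if h : i < (li.length : Int) then
    i :: pvPop li (PySem.List.pyGetD li i 0) (stSpec li (i + 1))
  else []
termination_by ((li.length : Int) - i).toNat
decreasing_by omega

lemma findLE_some (li : List Int) (x : Int) :
    ∀ (fuel : Nat) (t j : Int), ((li.length : Int) - t).toNat = fuel →
      findLE li x t = some j → t ≤ j ∧ j < (li.length : Int) := by
  intro fuel
  induction fuel with
  | zero =>
    intro t j hf h
    rw [findLE] at h
    have : ¬ t < (li.length : Int) := by omega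
    simp [this] at h
  | succ n ih =>
    intro t j hf h
    rw [findLE] at h
    by_cases ht : t < (li.length : Int)
    · simp only [ht, dif_pos] at h
      by_cases hle : PySem.List.pyGetD li t 0 ≤ x
      · simp [hle] at h; omega
      · simp [hle] at h
        have := ih (t + 1) j (by omega) h
        omega
    · simp [ht] at h

lemma cand_bound (li : List Int) (i : Int) (m : Int) (h0 : 0 ≤ m)
    (h : (li.length : Int) - i - 2 < m) : candD li i ≤ m := by
  unfold candD
  cases hf : findLE li (PySem.List.pyGetD li i 0) (i + 1) with
  | none => simpa using h0
  | some j =>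
    have := findLE_some li _ _ _ _ rfl hf
    simp [Option.elim]
    omega

-- A's inner loop computes the breaker and the max-update in one shot
lemma inner_eq (li : List Int) (iv : Int) :
    ∀ (fuel : Nat) (t c temp m : Int), ((li.length : Int) - t).toNat = fuel →
      pvInner li iv c temp m (PySem.List.pyRange t (li.length : Int) 1) =
        (findLE li (PySem.List.pyGetD li iv 0) t).elim m
          (fun j => if m < c + (j - t) then c + (j - t) else m) := by
  intro fuel
  induction fuel with
  | zero =>
    intro t c temp m hf
    have ht : ¬ t < (li.length : Int) := by omega
    rw [PySem.List.pyRange_one_eq_nil (by omega), findLE]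
    simp [ht, pvInner]
  | succ n ih =>
    intro t c temp m hf
    by_cases ht : t < (li.length : Int)
    · rw [PySem.List.pyRange_one_cons ht, findLE]
      simp only [ht, dif_pos, pvInner]
      by_cases hgt : PySem.List.pyGetD li t 0 > PySem.List.pyGetD li iv 0
      · have hle : ¬ PySem.List.pyGetD li t 0 ≤ PySem.List.pyGetD li iv 0 := by omega
        simp only [hgt, if_pos, hle]
        rw [ih (t + 1) (c + 1) (temp + 1) m (by omega)]
        cases hf2 : findLE li (PySem.List.pyGetD li iv 0) (t + 1) with
        | none => simp
        | some j =>
          have : c + 1 + (j - (t + 1)) = c + (j - t) := by ring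
          simp [Option.elim, this]
      · have hle : PySem.List.pyGetD li t 0 ≤ PySem.List.pyGetD li iv 0 := by omega
        simp only [hgt, hle, if_pos, Option.elim]
        simp
    · rw [PySem.List.pyRange_one_eq_nil (by omega), findLE]
      simp [ht, pvInner]

lemma inner_cand (li : List Int) (i m : Int) (h0 : 0 ≤ m) :
    pvInner li i 0 i m (PySem.List.pyRange (i + 1) (li.length : Int) 1) =
      max m (candD li i) := by
  rw [inner_eq li i _ (i + 1) 0 i m rfl]
  unfold candD
  cases hf : findLE li (PySem.List.pyGetD li i 0) (i + 1) with
  | none => simp; omega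
  | some j =>
    simp only [Option.elim]
    have : 0 + (j - (i + 1)) = j - i - 1 := by ring
    rw [this]
    by_cases h : m < j - i - 1 <;> simp [h] <;> omega

lemma sup_const (li : List Int) :
    ∀ (l : List Int) (m : Int), (∀ i ∈ l, candD li i ≤ m) →
      l.foldl (fun b i => max b (candD li i)) m = m := by
  intro l
  induction l with
  | nil => intro m _; rfl
  | cons a l ih =>
    intro m h
    simp only [List.foldl_cons]
    have ha : candD li a ≤ m := h a (by simp)
    rw [max_eq_left ha]
    exact ih m (fun i hi => h i (List.mem_cons_of_mem _ hi))

lemma sup_le_init (li : List Int) :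
    ∀ (l : List Int) (m : Int), m ≤ l.foldl (fun b i => max b (candD li i)) m := by
  intro l
  induction l with
  | nil => intro m; exact le_refl m
  | cons a l ih =>
    intro m
    simp only [List.foldl_cons]
    exact le_trans (le_max_left _ _) (ih _)

-- A's outer loop (with its early return) equals the plain fold of max over candidates
lemma outer_eq (li : List Int) :
    ∀ (fuel : Nat) (t m : Int), ((li.length : Int) - 1 - t).toNat = fuel → 0 ≤ m →
      pvOuter li (li.length : Int) (PySem.List.pyRange t ((li.length : Int) - 1) 1) m =
        (PySem.List.pyRange t ((li.length : Int) - 1) 1).foldl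
          (fun b i => max b (candD li i)) m := by
  intro fuel
  induction fuel with
  | zero =>
    intro t m hf _
    rw [PySem.List.pyRange_one_eq_nil (by omega)]
    rfl
  | succ n ih =>
    intro t m hf h0
    by_cases ht : t < (li.length : Int) - 1
    · rw [PySem.List.pyRange_one_cons ht]
      simp only [pvOuter, List.foldl_cons]
      by_cases hret : (li.length : Int) - 1 - t < m ∨ (li.length : Int) - 1 - t = m
      · simp only [hret, if_pos]
        rw [max_eq_left (cand_bound li t m h0 (by omega))]
        rw [sup_const li _ m ?_]
        intro i hi
        rw [PySem.List.mem_pyRange_one] at hi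
        exact cand_bound li i m h0 (by omega)
      · simp only [hret]
        rw [inner_cand li t m h0]
        exact ih (t + 1) (max m (candD li t)) (by omega) (le_trans h0 (le_max_left _ _))
    · rw [PySem.List.pyRange_one_eq_nil (by omega)]
      rfl

-- dropping-while composes: popping with a smaller pivot subsumes an earlier pop
lemma pop_comp (li : List Int) (x y : Int) (hxy : x ≤ y) :
    ∀ s : List Int, pvPop li x (pvPop li y s) = pvPop li x s := by
  intro s
  induction s with
  | nil => rfl
  | cons t s ih =>
    by_cases hgt : PySem.List.pyGetD li t 0 > y
    · have hx : PySem.List.pyGetD li t 0 > x := by omega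
      simp [pvPop, hgt, hx, ih]
    · simp [pvPop, hgt]

-- the key stack fact: after popping with pivot x, the top is the first index ≥ i with value ≤ x
lemma pop_head (li : List Int) :
    ∀ (fuel : Nat) (i x : Int), ((li.length : Int) - i).toNat = fuel →
      (pvPop li x (stSpec li i)).head? = findLE li x i := by
  intro fuel
  induction fuel with
  | zero =>
    intro i x hf
    have hi : ¬ i < (li.length : Int) := by omega
    rw [stSpec, findLE]
    simp [hi, pvPop]
  | succ n ih =>
    intro i x hf
    by_cases hi : i < (li.length : Int)
    · rw [stSpec, findLE]
      simp only [hi, dif_pos]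
      by_cases hle : PySem.List.pyGetD li i 0 ≤ x
      · have : ¬ PySem.List.pyGetD li i 0 > x := by omega
        simp [pvPop, this, hle]
      · have hgt : PySem.List.pyGetD li i 0 > x := by omega
        simp only [pvPop, hgt, if_pos, hle]
        rw [pop_comp li x (PySem.List.pyGetD li i 0) (by omega)]
        exact ih (i + 1) x (by omega)
    · rw [stSpec, findLE]
      simp [hi, pvPop]

-- B's loop equals the fold of max over candidates, taken right to left
lemma alt_eq (li : List Int) :
    ∀ (n : Nat) (b : Int), 0 ≤ b → (n : Int) ≤ (li.length : Int) →
      pvAlt li (PySem.List.pyRange ((n : Int) - 1) (-1) (-1)) (stSpec li n) b =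
        (PySem.List.pyRange ((n : Int) - 1) (-1) (-1)).foldl
          (fun m j => max m (candD li j)) b := by
  intro n
  induction n with
  | zero =>
    intro b _ _
    rw [PySem.List.pyRange_neg_one_eq_nil (by omega)]
    rfl
  | succ n ih =>
    intro b hb hn
    have hc : ((n + 1 : Nat) : Int) = (n : Int) + 1 := by push_cast; ring
    rw [hc]
    have hc2 : (n : Int) + 1 - 1 = (n : Int) := by ring
    rw [hc2]
    have hlt : (n : Int) < (li.length : Int) := by rw [hc] at hn; omega
    rw [PySem.List.pyRange_neg_one_cons (show (-1 : Int) < (n : Int) by omega)]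
    simp only [pvAlt, List.foldl_cons]
    have hhead := pop_head li ((li.length : Int) - ((n : Int) + 1)).toNat ((n : Int) + 1)
      (PySem.List.pyGetD li (n : Int) 0) rfl
    have hstack : ((n : Int)) :: pvPop li (PySem.List.pyGetD li (n : Int) 0) (stSpec li ((n : Int) + 1)) = stSpec li (n : Int) := by
      conv_rhs => rw [stSpec]
      rw [dif_pos hlt]
    have hbest : (match pvPop li (PySem.List.pyGetD li (n : Int) 0) (stSpec li ((n : Int) + 1)) with
        | [] => b
        | t :: _ => if t - (n : Int) - 1 > b then t - (n : Int) - 1 else b) =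
        max b (candD li (n : Int)) := by
      unfold candD
      rw [← hhead]
      cases hp : pvPop li (PySem.List.pyGetD li (n : Int) 0) (stSpec li ((n : Int) + 1)) with
      | nil => simp; omega
      | cons t s =>
        simp only [List.head?_cons, Option.elim]
        by_cases h : t - (n : Int) - 1 > b <;> simp [h] <;> omega
    rw [hbest, hstack]
    exact ih (max b (candD li (n : Int))) (le_trans hb (le_max_left _ _)) (by omega)

lemma foldl_max_perm (li : List Int) (l₁ l₂ : List Int) (h : l₁.Perm l₂) (b : Int) :
    l₁.foldl (fun m j => max m (candD li j)) b = l₂.foldl (fun m j => max m (candD li j)) b := by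
  refine h.foldl_eq' ?_ b
  intro a _ c _ z
  simp only [max_assoc]
  rw [max_comm (candD li a) (candD li c)]

lemma cand_last (li : List Int) : candD li ((li.length : Int) - 1) = 0 := by
  unfold candD
  rw [findLE]
  rw [dif_neg (by omega : ¬ (li.length : Int) - 1 + 1 < (li.length : Int))]
  rfl

-- ===== VERDICT (by name: the statement is the Claim_ definition above) =====
theorem solution_spec : Claim_equal_solution := by
  unfold Claim_equal_solution
  intro li _
  unfold Spec_solution solution solution_alt
  rw [outer_eq li (((li.length : Int) - 1 - 0).toNat) 0 0 rfl (le_refl (0 : Int))]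
  have hB := alt_eq li li.length 0 (le_refl (0 : Int)) (le_refl _)
  have hst0 : stSpec li (li.length : Int) = [] := by
    rw [stSpec]; simp
  rw [hst0] at hB
  rw [hB]
  rcases Nat.eq_zero_or_pos li.length with h0 | hpos
  · rw [h0]
    simp [PySem.List.pyRange_one_eq_nil, PySem.List.pyRange_neg_one_eq_nil]
  · have hsplit : PySem.List.pyRange 0 (li.length : Int) 1 =
        PySem.List.pyRange 0 ((li.length : Int) - 1) 1 ++ [(li.length : Int) - 1] := by
      simpa using PySem.List.pyRange_one_succ_right (a := 0) (b := (li.length : Int) - 1) (by omega)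
    have hperm : (PySem.List.pyRange ((li.length : Int) - 1) (-1) (-1)).Perm
        (PySem.List.pyRange 0 ((li.length : Int) - 1) 1 ++ [(li.length : Int) - 1]) := by
      rw [← hsplit]
      have : PySem.List.pyRange ((li.length : Int) - 1) (-1) (-1) =
          (PySem.List.pyRange 0 (li.length : Int) 1).reverse := by
        have := PySem.List.pyRange_neg_one_eq_reverse (a := (li.length : Int) - 1) (b := -1)
        simpa using this
      rw [this]
      exact (List.reverse_perm _)
    rw [foldl_max_perm li _ _ hperm 0]
    rw [List.foldl_append]
    simp only [List.foldl_cons, List.foldl_nil]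
    rw [cand_last li, max_eq_left]
    exact le_trans (le_refl 0) (sup_le_init li _ 0)
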